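-- pv_equiv track=rewrite | github.com/flywalk4/report_3_shalimov | main.py | concat_currencies
-- ===== SOURCE A (Python) =====
-- def concat_currencies(currencies_by_year):
--     new_currencies = {}
--     for currencies in currencies_by_year:
--         for currency in currencies:
--             if currency not in new_currencies:
--                 new_currencies[currency] = 0
--             new_currencies[currency] += currencies[currency]
--     return new_currencies
-- ===== SOURCE B (Python) =====
-- def concat_currencies(currencies_by_year):
--     all_keys = dict.fromkeys(k for d in currencies_by_year for k in d)
--     return {c: sum(d.get(c, 0) for d in currencies_by_year) for c in all_keys}
-- ===== Notes on version B (the rewrite author's own statement) =====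
-- stated objective: alternative
-- what changed: B transposes the traversal: it first collects the currency names in first-appearance order (dict.fromkeys) and then builds the result with a key-outer dict comprehension summing each currency across the years, instead of A's year-outer accumulation into a mutable dict with a membership guard.
import Mathlib
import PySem

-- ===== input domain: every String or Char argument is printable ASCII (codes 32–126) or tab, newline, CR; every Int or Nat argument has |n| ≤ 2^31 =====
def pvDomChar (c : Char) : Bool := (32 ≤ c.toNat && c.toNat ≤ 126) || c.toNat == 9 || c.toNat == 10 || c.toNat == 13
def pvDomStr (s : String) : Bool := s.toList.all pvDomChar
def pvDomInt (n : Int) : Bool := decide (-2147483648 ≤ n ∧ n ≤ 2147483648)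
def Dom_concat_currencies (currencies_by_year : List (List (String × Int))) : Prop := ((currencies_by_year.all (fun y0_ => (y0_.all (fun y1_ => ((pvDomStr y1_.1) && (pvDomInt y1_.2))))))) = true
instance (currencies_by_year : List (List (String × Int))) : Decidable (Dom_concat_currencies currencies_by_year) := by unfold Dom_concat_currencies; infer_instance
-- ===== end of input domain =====

-- B inverts the traversal: keys in first-appearance order, then per-key sums across the years
-- (objective: alternative decomposition; equal on every input whose inner lists have distinct keys).


-- ===== PORT A =====
-- year-outer loop: setdefault-style membership guard, then 'new_currencies[currency] += currencies[currency]'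
-- ('currencies[currency]' is the dict lookup, ported as first-match lookup in the inner association list)
def concat_currencies (currencies_by_year : List (List (String × Int))) : List (String × Int) :=
  (currencies_by_year.foldl
    (fun (new_currencies : PySem.Dict String Int) currencies =>
      currencies.foldl
        (fun nc p =>
          let nc1 := if nc.contains p.1 then nc else nc.insert p.1 0
          nc1.insert p.1 (nc1.getD p.1 0 + (PySem.Dict.mk currencies).getD p.1 0))
        new_currencies)
    PySem.Dict.empty).items

-- ===== PORT B =====
-- key-outer: first-appearance key list (dict.fromkeys), then per-key sum across the years
def concat_currencies_alt (currencies_by_year : List (List (String × Int))) : List (String × Int) :=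
  let all_keys := PySem.List.dedup (currencies_by_year.flatMap (fun d => d.map (·.1)))
  all_keys.map (fun c =>
    (c, currencies_by_year.foldl (fun s d => s + (PySem.Dict.mk d).getD c 0) 0))

-- ===== PRECONDITION & SPEC =====
-- Pre_ excludes inputs where some inner association list has duplicate keys: such lists do not
-- represent any Python dict (Python collapses duplicate keys before the function ever sees them).
def Pre_concat_currencies (currencies_by_year : List (List (String × Int))) : Prop :=
  ∀ d ∈ currencies_by_year, (d.map (·.1)).Nodup
instance (currencies_by_year : List (List (String × Int))) : Decidable (Pre_concat_currencies currencies_by_year) := by unfold Pre_concat_currencies; infer_instance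
def pvWitness_concat_currencies : (List (List (String × Int))) := [[("usd", 1), ("eur", 2)], [("eur", 3), ("rub", 4)]]
def Spec_concat_currencies (currencies_by_year : List (List (String × Int))) (out : List (String × Int)) : Prop := out = concat_currencies_alt currencies_by_year
instance (currencies_by_year : List (List (String × Int))) (out : List (String × Int)) : Decidable (Spec_concat_currencies currencies_by_year out) := by unfold Spec_concat_currencies; infer_instance

-- ===== CLAIM (what is proved, stated in full; the proofs are below) =====
def Claim_equal_concat_currencies : Prop := ∀ (currencies_by_year : List (List (String × Int))), Dom_concat_currencies currencies_by_year → Pre_concat_currencies currencies_by_year → Spec_concat_currencies currencies_by_year (concat_currencies currencies_by_year)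

-- ===== LEMMAS AND PROOFS =====

-- A's inner-loop body (setdefault guard + add) is a single 'modify'
theorem concat_step_eq_modify (nc : PySem.Dict String Int) (k : String) (v : Int) :
    (let nc1 := if nc.contains k then nc else nc.insert k 0
     nc1.insert k (nc1.getD k 0 + v)) = nc.modify k 0 (· + v) := by
  by_cases h : nc.contains k = true
  · simp only [h, if_true, PySem.Dict.modify]
  · have h' : nc.contains k = false := by simpa using h
    simp only [h', Bool.false_eq_true, if_false, PySem.Dict.modify]
    rw [PySem.Dict.getD_insert_self, PySem.Dict.insert_insert_self,
        PySem.Dict.getD_of_not_contains nc 0 h']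

-- value of a modify-fold at one key
theorem getD_foldl_modify_add (l : List (String × Int)) (d : PySem.Dict String Int) (c : String) :
    (l.foldl (fun d p => d.modify p.1 0 (· + p.2)) d).getD c 0
      = d.getD c 0 + ((l.filter (fun p => p.1 == c)).map (·.2)).sum := by
  induction l generalizing d with
  | nil => simp
  | cons p rest ih =>
    rw [List.foldl_cons, ih, PySem.Dict.getD_modify, List.filter_cons]
    by_cases hc : c = p.1
    · simp only [hc, if_true, beq_self_eq_true, List.map_cons, List.sum_cons]
      ring
    · have hf : (p.1 == c) = false := by simp [Ne.symm hc]
      rw [if_neg hc, hf]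
      simp

-- on an inner list with distinct keys the filtered sum is the dict lookup with default 0
theorem filter_sum_eq_getD (l : List (String × Int)) (c : String) (h : (l.map (·.1)).Nodup) :
    ((l.filter (fun p => p.1 == c)).map (·.2)).sum = (PySem.Dict.mk l).getD c 0 := by
  induction l with
  | nil => simp [PySem.Dict.getD, PySem.Dict.get?]
  | cons p rest ih =>
    rw [List.map_cons] at h
    obtain ⟨hnm, hnd⟩ := List.nodup_cons.mp h
    rw [List.filter_cons, PySem.Dict.getD, PySem.Dict.get?_mk_cons]
    by_cases hc : p.1 = c
    · have hrest : rest.filter (fun q => q.1 == c) = [] := by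
        apply List.filter_eq_nil_iff.mpr
        intro q hq
        simp only [beq_iff_eq]
        intro hqc
        apply hnm
        rw [hc, ← hqc]
        exact List.mem_map_of_mem hq
      simp [hc, hrest]
    · have : (p.1 == c) = false := by simp [hc]
      rw [this]
      simp only [Bool.false_eq_true, if_false]
      exact ih hnd

-- under Pre_, A's inner loop over one year is the plain modify-fold over its pairs
theorem inner_eq (y : List (String × Int)) (hn : (y.map (·.1)).Nodup) (d : PySem.Dict String Int) :
    y.foldl (fun nc p =>
        let nc1 := if nc.contains p.1 then nc else nc.insert p.1 0
        nc1.insert p.1 (nc1.getD p.1 0 + (PySem.Dict.mk y).getD p.1 0)) d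
      = y.foldl (fun d p => d.modify p.1 0 (· + p.2)) d := by
  apply PySem.List.foldl_congr_mem
  intro acc p hp
  rw [concat_step_eq_modify]
  have hv : (PySem.Dict.mk y).getD p.1 0 = p.2 := by
    apply PySem.Dict.getD_of_mem_items
    · exact hp
    · rw [PySem.Dict.keys_mk]; exact hn
  rw [hv]

-- keys of A's double fold: first-appearance order over all years' keys
theorem keys_fold (ys : List (List (String × Int))) (d : PySem.Dict String Int) :
    (ys.foldl (fun d y => y.foldl (fun d p => d.modify p.1 0 (· + p.2)) d) d).keys
      = PySem.Set.update d.keys (ys.flatMap (fun y => y.map (·.1))) := by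
  induction ys generalizing d with
  | nil => simp [PySem.Set.update]
  | cons y ys ih =>
    rw [List.foldl_cons, ih,
        PySem.Dict.keys_foldl_modify_key y (fun p => p.1) 0 (fun _ p v => v + p.2)]
    simp [PySem.Set.update, List.foldl_append]

theorem nodup_fold (ys : List (List (String × Int))) (d : PySem.Dict String Int)
    (h : d.keys.Nodup) :
    (ys.foldl (fun d y => y.foldl (fun d p => d.modify p.1 0 (· + p.2)) d) d).keys.Nodup := by
  induction ys generalizing d with
  | nil => exact h
  | cons y ys ih =>
    exact ih _ (PySem.Dict.nodup_keys_foldl_modify_key y (fun p => p.1) 0 (fun _ p v => v + p.2) d h)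

-- value of A's double fold at one key
theorem getD_fold (ys : List (List (String × Int))) (d : PySem.Dict String Int) (c : String) :
    (ys.foldl (fun d y => y.foldl (fun d p => d.modify p.1 0 (· + p.2)) d) d).getD c 0
      = d.getD c 0 + (ys.map (fun y => ((y.filter (fun p => p.1 == c)).map (·.2)).sum)).sum := by
  induction ys generalizing d with
  | nil => simp
  | cons y ys ih =>
    rw [List.foldl_cons, ih, getD_foldl_modify_add, List.map_cons, List.sum_cons]
    ring

-- ===== VERDICT (by name: the statement is the Claim_ definition above) =====
theorem concat_currencies_spec : Claim_equal_concat_currencies := by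
  intro ys _ hpre
  unfold Spec_concat_currencies concat_currencies concat_currencies_alt
  have hstep : ys.foldl
      (fun (new_currencies : PySem.Dict String Int) currencies =>
        currencies.foldl
          (fun nc p =>
            let nc1 := if nc.contains p.1 then nc else nc.insert p.1 0
            nc1.insert p.1 (nc1.getD p.1 0 + (PySem.Dict.mk currencies).getD p.1 0))
          new_currencies)
      PySem.Dict.empty
      = ys.foldl (fun d y => y.foldl (fun d p => d.modify p.1 0 (· + p.2)) d) PySem.Dict.empty := by
    apply PySem.List.foldl_congr_mem
    intro acc y hy
    exact inner_eq y (hpre y hy) acc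
  rw [hstep]
  have hnd : (ys.foldl (fun d y => y.foldl (fun d p => d.modify p.1 0 (· + p.2)) d)
      PySem.Dict.empty).keys.Nodup := by
    apply nodup_fold
    simp [PySem.Dict.empty]
  rw [PySem.Dict.items_eq_map_keys _ hnd 0, keys_fold]
  have hkeys : PySem.Set.update (PySem.Dict.empty (κ := String) (ν := Int)).keys
      (ys.flatMap (fun y => y.map (·.1)))
      = PySem.List.dedup (ys.flatMap (fun d => d.map (·.1))) := by
    rw [PySem.List.dedup_eq_ofList]
    rfl
  rw [hkeys]
  apply List.map_congr_left
  intro c _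
  rw [getD_fold, PySem.List.foldl_add]
  have hempty : (PySem.Dict.empty (κ := String) (ν := Int)).getD c 0 = 0 := by
    simp [PySem.Dict.getD, PySem.Dict.get?, PySem.Dict.empty]
  rw [hempty]
  have hsum : (ys.map (fun y => ((y.filter (fun p => p.1 == c)).map (·.2)).sum)).sum
      = (ys.map (fun d => (PySem.Dict.mk d).getD c 0)).sum := by
    congr 1
    apply List.map_congr_left
    intro y hy
    exact filter_sum_eq_getD y c (hpre y hy)
  rw [hsum]
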